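-- pv_equiv track=rewrite | github.com/pypi-data/pypi-mirror-212 | packages/auraboros/auraboros-1.0.0a0-py3-none-any.whl/auraboros/__main__.py | calc_best_chunk_size_of_dl
-- ===== SOURCE A (Python) =====
-- def calc_best_chunk_size_of_dl(filesize):
--     for i in range(0, 2):
--         if filesize < 1024 * 1024 * (10**i):
--             chunk_size = 1024 * (10**i)
--             filesize_is_large = False
--         else:
--             filesize_is_large = True
--     if filesize_is_large:
--         chunk_size = 1024**2
--     return chunk_size
-- ===== SOURCE B (Python) =====
-- def calc_best_chunk_size_of_dl(filesize):
--     # The loop's i=0 assignment is always overwritten; observably two-valued.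
--     return 10 * 1024 if filesize < 10 * 1024 * 1024 else 1024 ** 2
-- ===== Notes on version B (the rewrite author's own statement) =====
-- stated objective: simpler
-- what changed: Replaced the two-iteration loop with flag variable by a single closed-form threshold comparison (the i=0 iteration's assignment is always overwritten).
import Mathlib
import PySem

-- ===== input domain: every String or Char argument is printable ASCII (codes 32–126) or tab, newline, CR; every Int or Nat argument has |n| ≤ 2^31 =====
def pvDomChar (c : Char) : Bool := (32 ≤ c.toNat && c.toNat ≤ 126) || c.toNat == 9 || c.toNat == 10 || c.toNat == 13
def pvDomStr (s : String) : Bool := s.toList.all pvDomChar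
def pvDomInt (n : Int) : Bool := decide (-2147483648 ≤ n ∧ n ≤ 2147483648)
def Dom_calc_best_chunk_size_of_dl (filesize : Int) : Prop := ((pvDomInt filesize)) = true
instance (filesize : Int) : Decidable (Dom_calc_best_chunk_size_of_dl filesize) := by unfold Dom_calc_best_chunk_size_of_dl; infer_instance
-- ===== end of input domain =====

-- ===== PORT A =====
-- Literal port of A: the two-iteration loop carries (chunk_size?, filesize_is_large?) state.
-- (The .getD 0 / default-false reads are unreachable guards: the loop always sets both.)
def calc_best_chunk_size_of_dl (filesize : Int) : Int :=
  let st : Option Int × Option Bool :=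
    (PySem.List.pyRange 0 2 1).foldl
      (fun st i =>
        if filesize < 1024 * 1024 * (10 ^ i.toNat) then
          (some (1024 * (10 ^ i.toNat)), some false)
        else
          (st.1, some true))
      (none, none)
  let chunk_size : Option Int := st.1
  if st.2.getD false then (1024 : Int) ^ 2 else chunk_size.getD 0

-- ===== PORT B =====
-- B: one threshold comparison (objective: simpler).
def calc_best_chunk_size_of_dl_alt (filesize : Int) : Int :=
  if filesize < 10 * 1024 * 1024 then 10 * 1024 else 1024 ^ 2

-- ===== PRECONDITION & SPEC =====
def Spec_calc_best_chunk_size_of_dl (filesize : Int) (out : Int) : Prop := out = calc_best_chunk_size_of_dl_alt filesize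
instance (filesize : Int) (out : Int) : Decidable (Spec_calc_best_chunk_size_of_dl filesize out) := by unfold Spec_calc_best_chunk_size_of_dl; infer_instance

-- ===== CLAIM (what is proved, stated in full; the proofs are below) =====
def Claim_equal_calc_best_chunk_size_of_dl : Prop := ∀ (filesize : Int), Dom_calc_best_chunk_size_of_dl filesize → Spec_calc_best_chunk_size_of_dl filesize (calc_best_chunk_size_of_dl filesize)

-- ===== LEMMAS AND PROOFS =====

-- ===== VERDICT (by name: the statement is the Claim_ definition above) =====
theorem calc_best_chunk_size_of_dl_spec : Claim_equal_calc_best_chunk_size_of_dl := by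
  intro filesize _
  unfold Spec_calc_best_chunk_size_of_dl calc_best_chunk_size_of_dl calc_best_chunk_size_of_dl_alt
  have hr : PySem.List.pyRange 0 2 1 = [0, 1] := by decide
  rw [hr]
  norm_num [List.foldl]
  split_ifs <;> simp_all
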